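-- pv_equiv track=rewrite | github.com/TheBigBear/Advent-of-code-2025 | python/day02-code.py | _sum_invalid_in_range
-- ===== SOURCE A (Python) =====
-- def _sum_integers(a: int, b: int) -> int:
--     """Sum of consecutive integers from a to b inclusive.
--     Returns 0 if b < a. Works with Python big ints exactly.
--     """
--     if b < a:
--         return 0
--     count = b - a + 1
--     # Use parity to avoid fractional intermediate
--     if (count % 2) == 0:
--         return (count // 2) * (a + b)
--     else:
--         return ((a + b) // 2) * count
--
-- def _pow10(n: int) -> int:
--     """Exact integer 10**n (explicit helper for clarity)."""
--     return 10 ** n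
--
-- def _sum_invalid_in_range(lo: int, hi: int) -> int:
--     """Closed-form sum of all invalid IDs n in [lo, hi],
--     where invalid means n = x * (10**m + 1) with x being m-digit (no leading zeros).
--
--     We iterate over m (half-length of the ID), translate bounds on n into bounds on x,
--     intersect with the m-digit window, and sum via arithmetic series.
--     """
--     if hi < lo:
--         lo, hi = hi, lo
--     if hi < 1:
--         return 0
--     if lo < 1:
--         lo = 1
--
--     total = 0
--
--     digits_end = len(str(hi))  # robust digit count
--     for m in range(1, (digits_end // 2) + 1):
--         pow10_m = _pow10(m)
--         pow10_m_1 = _pow10(m - 1)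
--         factor = pow10_m + 1  # n = x * (10^m + 1)
--
--         # x must be m-digit: x in [10^(m-1), 10^m - 1]
--         x_min_mdigit = pow10_m_1
--         x_max_mdigit = pow10_m - 1
--
--         # Translate n-range to x-range via division.
--         # ceil(lo / factor), floor(hi / factor) — factor > 0 always.
--         x_min = (lo + factor - 1) // factor
--         x_max = hi // factor
--
--         # Intersect with the m-digit window.
--         if x_min < x_min_mdigit:
--             x_min = x_min_mdigit
--         if x_max > x_max_mdigit:
--             x_max = x_max_mdigit
--
--         if x_max < x_min:
--             continue
--
--         sum_x = _sum_integers(x_min, x_max)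
--         total += factor * sum_x
--
--     return total
-- ===== SOURCE B (Python) =====
-- def _sum_invalid_in_range(lo: int, hi: int) -> int:
--     """Sum of invalid IDs n = x * (10**m + 1) with m-digit x, for n in [lo, hi].
--
--     Instead of translating the n-bounds into x-bounds and summing a closed-form
--     arithmetic series, enumerate every m-digit half x directly and add the
--     candidate n = x * (10**m + 1) whenever it falls inside the range.
--     """
--     if hi < lo:
--         lo, hi = hi, lo
--     if hi < 1:
--         return 0
--     if lo < 1:
--         lo = 1
--
--     total = 0
--     for m in range(1, (len(str(hi)) // 2) + 1):
--         factor = 10 ** m + 1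
--         for x in range(10 ** (m - 1), 10 ** m):
--             n = x * factor
--             if lo <= n <= hi:
--                 total += n
--     return total
-- ===== Notes on version B (the rewrite author's own statement) =====
-- stated objective: simpler
-- what changed: A translates the n-range into closed-form x-bounds per half-length via ceiling/floor division and sums an arithmetic series; B instead enumerates every m-digit half x and adds the candidate x*(10^m+1) when it lies in [lo,hi].
import Mathlib
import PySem

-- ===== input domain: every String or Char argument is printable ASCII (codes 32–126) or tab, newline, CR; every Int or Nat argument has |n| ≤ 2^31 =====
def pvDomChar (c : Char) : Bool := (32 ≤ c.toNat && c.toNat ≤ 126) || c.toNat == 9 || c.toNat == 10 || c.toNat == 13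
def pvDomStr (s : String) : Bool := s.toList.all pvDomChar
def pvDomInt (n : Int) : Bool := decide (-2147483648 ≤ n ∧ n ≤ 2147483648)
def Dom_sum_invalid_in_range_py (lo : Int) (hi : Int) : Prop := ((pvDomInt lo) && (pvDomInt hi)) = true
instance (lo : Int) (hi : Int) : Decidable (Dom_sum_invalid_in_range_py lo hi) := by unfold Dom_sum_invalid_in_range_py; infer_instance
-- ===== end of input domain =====

-- B replaces A's per-half-length closed-form series (division-derived x-bounds + arithmetic sum)
-- with a direct enumeration of every m-digit half x, filtering candidates x*(10^m+1) into [lo,hi];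
-- objective: simpler (no bound translation, no series formula), not faster.

-- ===== PORT A =====
-- port of helper _sum_integers
def sumIntegersPy (a : Int) (b : Int) : Int :=
  if b < a then 0
  else
    let count := b - a + 1
    if PySem.Int.mod count 2 = 0 then
      (PySem.Int.floordiv count 2) * (a + b)
    else
      (PySem.Int.floordiv (a + b) 2) * count

-- port of helper _pow10; exact for n ≥ 0 (the only calls A makes: n = m or m-1 with m ≥ 1)
def pow10Py (n : Int) : Int := 10 ^ n.toNat

def sum_invalid_in_range_py (lo : Int) (hi : Int) : Int :=
  let p := if hi < lo then (hi, lo) else (lo, hi)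
  let lo := p.1
  let hi := p.2
  if hi < 1 then 0
  else
    let lo := if lo < 1 then 1 else lo
    let digits_end := PySem.Str.len (PySem.Int.toStr hi)
    (PySem.List.pyRange 1 (PySem.Int.floordiv digits_end 2 + 1) 1).foldl
      (fun total m =>
        let pow10_m := pow10Py m
        let pow10_m_1 := pow10Py (m - 1)
        let factor := pow10_m + 1
        let x_min_mdigit := pow10_m_1
        let x_max_mdigit := pow10_m - 1
        let x_min := PySem.Int.floordiv (lo + factor - 1) factor
        let x_max := PySem.Int.floordiv hi factor
        let x_min := if x_min < x_min_mdigit then x_min_mdigit else x_min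
        let x_max := if x_max > x_max_mdigit then x_max_mdigit else x_max
        if x_max < x_min then total
        else total + factor * sumIntegersPy x_min x_max) 0

-- ===== PORT B =====
def sum_invalid_in_range_py_alt (lo : Int) (hi : Int) : Int :=
  let p := if hi < lo then (hi, lo) else (lo, hi)
  let lo := p.1
  let hi := p.2
  if hi < 1 then 0
  else
    let lo := if lo < 1 then 1 else lo
    (PySem.List.pyRange 1 (PySem.Int.floordiv (PySem.Str.len (PySem.Int.toStr hi)) 2 + 1) 1).foldl
      (fun total m =>
        let factor := 10 ^ m.toNat + 1
        (PySem.List.pyRange (10 ^ (m - 1).toNat) (10 ^ m.toNat) 1).foldl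
          (fun total x =>
            let n := x * factor
            if lo ≤ n ∧ n ≤ hi then total + n else total) total) 0

-- ===== PRECONDITION & SPEC =====
def Spec_sum_invalid_in_range_py (lo : Int) (hi : Int) (out : Int) : Prop := out = sum_invalid_in_range_py_alt lo hi
instance (lo : Int) (hi : Int) (out : Int) : Decidable (Spec_sum_invalid_in_range_py lo hi out) := by unfold Spec_sum_invalid_in_range_py; infer_instance

-- ===== CLAIM (what is proved, stated in full; the proofs are below) =====
def Claim_equal_sum_invalid_in_range_py : Prop := ∀ (lo : Int) (hi : Int), Dom_sum_invalid_in_range_py lo hi → Spec_sum_invalid_in_range_py lo hi (sum_invalid_in_range_py lo hi)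

-- ===== LEMMAS AND PROOFS =====

-- sum of the integer interval [p, q)
def ivalSum (p : Int) (q : Int) : Int := (PySem.List.pyRange p q 1).sum

theorem ivalSum_nil {p q : Int} (h : q ≤ p) : ivalSum p q = 0 := by
  simp [ivalSum, PySem.List.pyRange_one_eq_nil h]

theorem ivalSum_cons {p q : Int} (h : p < q) : ivalSum p q = p + ivalSum (p + 1) q := by
  simp [ivalSum, PySem.List.pyRange_one_cons h]

theorem two_ivalSum (p q : Int) (h : p ≤ q) : 2 * ivalSum p q = (q - p) * (p + q - 1) := by
  obtain ⟨n, hn⟩ : ∃ n : Nat, q = p + n := ⟨(q - p).toNat, by omega⟩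
  subst hn
  induction n with
  | zero =>
    have h0 : p + ((0:Nat):Int) = p := by push_cast; ring
    rw [h0, ivalSum_nil le_rfl]; ring
  | succ k ih =>
    have hk : p ≤ p + (k : Int) := by omega
    have hstep : ivalSum p (p + (k:Int) + 1) = ivalSum p (p + (k:Int)) + (p + k) := by
      simp [ivalSum, PySem.List.pyRange_one_succ_right hk]
    have h2 := ih hk
    push_cast
    push_cast at h2 hstep
    have : p + ((k:Int) + 1) = p + (k:Int) + 1 := by ring
    rw [this, hstep]
    nlinarith [h2]

-- A's closed-form series helper computes the interval sum
theorem sumIntegersPy_eq_ivalSum (p q : Int) (h : p ≤ q) :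
    sumIntegersPy p q = ivalSum p (q + 1) := by
  have h2S : 2 * ivalSum p (q + 1) = (q + 1 - p) * (p + q) := by
    have := two_ivalSum p (q + 1) (by omega)
    linarith [this]
  unfold sumIntegersPy
  rw [if_neg (by omega)]
  dsimp only
  rw [PySem.Int.mod_eq_emod_of_pos (by omega : (0:Int) < 2),
      PySem.Int.floordiv_eq_ediv_of_pos (by omega : (0:Int) < 2),
      PySem.Int.floordiv_eq_ediv_of_pos (by omega : (0:Int) < 2)]
  split_ifs with hpar
  · have hc : 2 * ((q - p + 1) / 2) = q - p + 1 := by omega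
    have e : 2 * ((q - p + 1) / 2 * (p + q)) = 2 * ((q - p + 1) / 2) * (p + q) := by ring
    have : 2 * ((q - p + 1) / 2 * (p + q)) = 2 * ivalSum p (q + 1) := by
      rw [e, hc, h2S]; ring
    linarith [this]
  · have hc : 2 * ((p + q) / 2) = p + q := by omega
    have e : 2 * ((p + q) / 2 * (q - p + 1)) = 2 * ((p + q) / 2) * (q - p + 1) := by ring
    have : 2 * ((p + q) / 2 * (q - p + 1)) = 2 * ivalSum p (q + 1) := by
      rw [e, hc, h2S]; ring
    linarith [this]

-- the filter window [lo,hi] on n = x*f translates to the division bounds on x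
theorem cond_iff (lo hi f x : Int) (hf : 0 < f) :
    (lo ≤ x * f ∧ x * f ≤ hi) ↔
    (PySem.Int.floordiv (lo + f - 1) f ≤ x ∧ x ≤ PySem.Int.floordiv hi f) := by
  have h1 : x ≤ PySem.Int.floordiv hi f ↔ x * f ≤ hi :=
    PySem.Int.le_floordiv_iff_mul_le hf
  have h2 : x + 1 ≤ PySem.Int.floordiv (lo + f - 1) f ↔ (x + 1) * f ≤ lo + f - 1 :=
    PySem.Int.le_floordiv_iff_mul_le hf
  have h3 : (x + 1) * f = x * f + f := by ring
  rw [h3] at h2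
  generalize x * f = y at h1 h2 ⊢
  omega

-- B's inner enumeration loop equals A's bounded closed-form contribution
theorem inner_eq (lo hi f a b t : Int) (hf : 0 < f) :
    (PySem.List.pyRange a b 1).foldl
      (fun tot x => let n := x * f; if lo ≤ n ∧ n ≤ hi then tot + n else tot) t
    = t + f * ivalSum (max a (PySem.Int.floordiv (lo + f - 1) f))
                      (min b (PySem.Int.floordiv hi f + 1)) := by
  set c := PySem.Int.floordiv (lo + f - 1) f with hc
  set d := PySem.Int.floordiv hi f with hd
  obtain ⟨n, hn⟩ : ∃ n : Nat, b ≤ a + n := ⟨(b - a).toNat, by omega⟩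
  induction n generalizing a t with
  | zero =>
    have hba : b ≤ a := by omega
    rw [PySem.List.pyRange_one_eq_nil hba]
    have : min b (d + 1) ≤ max a c := by omega
    simp [ivalSum_nil this]
  | succ k ih =>
    by_cases hab : b ≤ a
    · rw [PySem.List.pyRange_one_eq_nil hab]
      have : min b (d + 1) ≤ max a c := by omega
      simp [ivalSum_nil this]
    · push Not at hab
      rw [PySem.List.pyRange_one_cons hab]
      simp only [List.foldl_cons]
      have hcond := cond_iff lo hi f a hf
      rw [← hc, ← hd] at hcond
      by_cases hin : lo ≤ a * f ∧ a * f ≤ hi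
      · rw [if_pos hin]
        rw [ih (a + 1) (t + a * f) (by omega)]
        obtain ⟨hca, had⟩ := hcond.mp hin
        have hmax1 : max a c = a := by omega
        have hmax2 : max (a + 1) c = a + 1 := by omega
        have hlt : a < min b (d + 1) := by omega
        rw [hmax1, hmax2, ivalSum_cons hlt]
        ring
      · rw [if_neg hin]
        rw [ih (a + 1) t (by omega)]
        have hnot : ¬ (c ≤ a ∧ a ≤ d) := fun h => hin (hcond.mpr h)
        by_cases hca : a < c
        · have : max a c = max (a + 1) c := by omega
          rw [this]
        · have had : d < a := by omega
          have e1 : min b (d + 1) ≤ max a c := by omega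
          have e2 : min b (d + 1) ≤ max (a + 1) c := by omega
          rw [ivalSum_nil e1, ivalSum_nil e2]

-- per-m: A's loop body equals B's loop body (pointwise in the accumulator and m)
theorem step_eq (lo hi t m : Int) :
    (let pow10_m := pow10Py m
     let pow10_m_1 := pow10Py (m - 1)
     let factor := pow10_m + 1
     let x_min_mdigit := pow10_m_1
     let x_max_mdigit := pow10_m - 1
     let x_min := PySem.Int.floordiv (lo + factor - 1) factor
     let x_max := PySem.Int.floordiv hi factor
     let x_min := if x_min < x_min_mdigit then x_min_mdigit else x_min
     let x_max := if x_max > x_max_mdigit then x_max_mdigit else x_max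
     if x_max < x_min then t
     else t + factor * sumIntegersPy x_min x_max)
    = (PySem.List.pyRange (10 ^ (m - 1).toNat) (10 ^ m.toNat) 1).foldl
        (fun total x =>
          let n := x * (10 ^ m.toNat + 1)
          if lo ≤ n ∧ n ≤ hi then total + n else total) t := by
  have hf : (0:Int) < 10 ^ m.toNat + 1 := by positivity
  rw [inner_eq lo hi (10 ^ m.toNat + 1) (10 ^ (m - 1).toNat) (10 ^ m.toNat) t hf]
  simp only [pow10Py]
  set a : Int := 10 ^ (m - 1).toNat
  set b : Int := 10 ^ m.toNat
  set c := PySem.Int.floordiv (lo + (b + 1) - 1) (b + 1)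
  set d := PySem.Int.floordiv hi (b + 1)
  have hmax : (if c < a then a else c) = max a c := by omega
  have hmin : (if d > b - 1 then b - 1 else d) = min (b - 1) d := by omega
  simp only [hmax, hmin]
  by_cases hlt : min (b - 1) d < max a c
  · rw [if_pos hlt]
    have : min b (d + 1) ≤ max a c := by omega
    rw [ivalSum_nil this]; ring
  · rw [if_neg hlt]
    push Not at hlt
    rw [sumIntegersPy_eq_ivalSum _ _ hlt]
    have : min (b - 1) d + 1 = min b (d + 1) := by omega
    rw [this]

-- ===== VERDICT (by name: the statement is the Claim_ definition above) =====
theorem sum_invalid_in_range_py_spec : Claim_equal_sum_invalid_in_range_py := by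
  intro lo hi _
  unfold Spec_sum_invalid_in_range_py sum_invalid_in_range_py sum_invalid_in_range_py_alt
  dsimp only
  split_ifs
  all_goals
    first
      | rfl
      | (apply PySem.List.foldl_congr_mem
         intro acc m _
         exact step_eq _ _ acc m)
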